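-- pv_equiv track=rewrite | github.com/Percy08-dev/kyopro_python | ABC/ABC211/c.py | check
-- ===== SOURCE A (Python) =====
-- def check(aru, wakaranai, t):
--     f_list = set()
--     cnt = 0
--     for i in t:
--         if i in aru:
--             f_list.add(i)
--             cnt += 1
--         elif i in wakaranai:
--             cnt += 1
--
--     if cnt == 4 and f_list == set(aru) :
--         return True
--     else:
--         return False
-- ===== SOURCE B (Python) =====
-- def check(aru, wakaranai, t):
--     # Build a frequency table of t once, then iterate over the distinct
--     # query values (set(aru) | set(wakaranai)) and sum the stored counts;
--     # coverage of aru is a dict-membership test.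
--     freq = {}
--     for x in t:
--         freq[x] = freq.get(x, 0) + 1
--     cnt = sum(freq.get(u, 0) for u in set(aru) | set(wakaranai))
--     return cnt == 4 and all(u in freq for u in aru)
-- ===== Notes on version B (the rewrite author's own statement) =====
-- stated objective: alternative
-- what changed: Inverts the traversal: instead of scanning t and testing each element against the aru/wakaranai lists, B builds a frequency dict of t once and then iterates over the distinct union set(aru)|set(wakaranai) summing stored counts, with coverage of aru checked by dict membership.
import Mathlib
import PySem

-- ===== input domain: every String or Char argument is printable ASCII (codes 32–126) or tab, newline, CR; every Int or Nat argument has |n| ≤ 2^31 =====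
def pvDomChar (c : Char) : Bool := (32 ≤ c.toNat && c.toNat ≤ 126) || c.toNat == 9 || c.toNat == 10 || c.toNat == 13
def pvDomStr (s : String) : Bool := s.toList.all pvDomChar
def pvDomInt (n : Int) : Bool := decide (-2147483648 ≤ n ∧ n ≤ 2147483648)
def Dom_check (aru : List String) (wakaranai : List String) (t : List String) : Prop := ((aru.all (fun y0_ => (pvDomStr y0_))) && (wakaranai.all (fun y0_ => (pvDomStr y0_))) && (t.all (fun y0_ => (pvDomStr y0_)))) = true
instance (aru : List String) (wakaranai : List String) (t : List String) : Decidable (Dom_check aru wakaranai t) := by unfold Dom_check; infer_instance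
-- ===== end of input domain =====

-- B inverts the traversal: a frequency dict of t built once, then counts summed over the
-- distinct union of aru and wakaranai, coverage of aru by dict membership; objective: alternative.

-- ===== PORT A =====
def check (aru : List String) (wakaranai : List String) (t : List String) : Bool :=
  let st := t.foldl (fun (st : PySem.Set String × Int) i =>
      if aru.contains i then (PySem.Set.add st.1 i, st.2 + 1)
      else if wakaranai.contains i then (st.1, st.2 + 1)
      else st)
    (PySem.Set.empty, 0)
  if st.2 == 4 && PySem.Set.equal st.1 (PySem.Set.ofList aru) then true else false

-- ===== PORT B =====
def check_alt (aru : List String) (wakaranai : List String) (t : List String) : Bool :=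
  let freq := t.foldl (fun (d : PySem.Dict String Int) x => d.insert x (d.getD x 0 + 1)) PySem.Dict.empty
  let cnt : Int := ((PySem.Set.union (PySem.Set.ofList aru) wakaranai).map (fun u => freq.getD u 0)).sum
  cnt == 4 && aru.all (fun u => freq.contains u)

-- ===== PRECONDITION & SPEC =====
def Spec_check (aru : List String) (wakaranai : List String) (t : List String) (out : Bool) : Prop := out = check_alt aru wakaranai t
instance (aru : List String) (wakaranai : List String) (t : List String) (out : Bool) : Decidable (Spec_check aru wakaranai t out) := by unfold Spec_check; infer_instance

-- ===== CLAIM (what is proved, stated in full; the proofs are below) =====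
def Claim_equal_check : Prop := ∀ (aru : List String) (wakaranai : List String) (t : List String), Dom_check aru wakaranai t → Spec_check aru wakaranai t (check aru wakaranai t)

-- ===== LEMMAS AND PROOFS =====

-- A's loop state after folding t: the set is the start set updated with t's aru-members,
-- the counter grows by the number of elements of t lying in aru or wakaranai.
theorem check_loop_inv (aru wakaranai : List String) (t : List String)
    (s : PySem.Set String) (c : Int) :
    t.foldl (fun (st : PySem.Set String × Int) i =>
      if aru.contains i then (PySem.Set.add st.1 i, st.2 + 1)
      else if wakaranai.contains i then (st.1, st.2 + 1)
      else st) (s, c)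
    = (PySem.Set.update s (t.filter (fun i => aru.contains i)),
       c + (t.countP (fun i => aru.contains i || wakaranai.contains i) : Nat)) := by
  induction t generalizing s c with
  | nil => simp [PySem.Set.update]
  | cons x xs ih =>
      rw [List.foldl_cons, List.filter_cons, List.countP_cons]
      by_cases hx : aru.contains x = true
      · rw [if_pos hx, if_pos hx, ih, PySem.Set.update_cons]
        refine Prod.ext rfl ?_
        simp only [hx, Bool.true_or, if_pos]
        push_cast
        ring
      · rw [if_neg hx, if_neg hx]
        by_cases hw : wakaranai.contains x = true
        · rw [if_pos hw, ih]
          refine Prod.ext rfl ?_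
          simp only [hx, hw, Bool.false_or, if_pos]
          push_cast
          ring
        · rw [if_neg hw, ih]
          refine Prod.ext rfl ?_
          simp only [hx, hw, Bool.or_self]
          push_cast
          ring

-- counting elements with a disjoint disjunction of tests splits the count
theorem countP_or_disjoint (t : List String) (p q : String → Bool)
    (h : ∀ i, ¬(p i = true ∧ q i = true)) :
    t.countP (fun i => p i || q i) = t.countP p + t.countP q := by
  induction t with
  | nil => simp
  | cons x xs ih =>
      simp only [List.countP_cons, ih]
      by_cases hp : p x = true
      · have hq : q x = false := by
          cases hqx : q x
          · rfl
          · exact absurd ⟨hp, hqx⟩ (h x)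
        simp [hp, hq]; omega
      · simp only [Bool.not_eq_true] at hp
        by_cases hq : q x = true
        · simp [hp, hq]; omega
        · simp [hp, hq]

-- summing t's multiplicities over a duplicate-free list of values counts t's members of it
theorem sum_count_eq_countP (t : List String) (L : List String) (hnd : L.Nodup) :
    ((L.map (fun u => (t.count u : Int))).sum)
      = (t.countP (fun i => L.contains i) : Nat) := by
  induction L with
  | nil => simp
  | cons x xs ih =>
      obtain ⟨hx, hnd'⟩ := List.nodup_cons.mp hnd
      have hsplit : t.countP (fun i => (x :: xs).contains i)
          = t.countP (fun i => i == x) + t.countP (fun i => xs.contains i) := by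
        have := countP_or_disjoint t (fun i => i == x) (fun i => xs.contains i)
          (by intro i ⟨h1, h2⟩
              have : i = x := by simpa using h1
              exact hx (by simpa [this] using h2))
        rw [← this]
        apply List.countP_congr
        intro i _
        simp
      rw [List.map_cons, List.sum_cons, ih hnd', hsplit]
      have : t.count x = t.countP (fun i => i == x) := rfl
      rw [this]
      push_cast
      ring

-- A's set-equality test coincides with B's "every aru value occurs in t"
theorem check_equal_eq_all (aru t : List String) :
    PySem.Set.equal (PySem.Set.ofList (t.filter (fun i => aru.contains i)))
        (PySem.Set.ofList aru)
    = aru.all (fun u => t.contains u) := by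
  by_cases h : ∀ x ∈ aru, x ∈ t
  · have hr : aru.all (fun u => t.contains u) = true := by
      simp only [List.all_eq_true]
      intro u hu
      simpa using h u hu
    rw [hr, (PySem.Set.equal_iff _ _).2]
    intro x
    simp only [PySem.Set.mem_ofList, List.mem_filter, List.contains_iff_mem]
    exact ⟨fun ⟨_, hx⟩ => hx, fun hx => ⟨h x hx, hx⟩⟩
  · push Not at h
    obtain ⟨x, hxa, hxt⟩ := h
    have hr : aru.all (fun u => t.contains u) = false := by
      simp only [List.all_eq_false]
      exact ⟨x, hxa, by simpa using hxt⟩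
    have hl : PySem.Set.equal (PySem.Set.ofList (t.filter (fun i => aru.contains i)))
        (PySem.Set.ofList aru) = false := by
      by_contra hc
      simp only [Bool.not_eq_false] at hc
      have := ((PySem.Set.equal_iff _ _).1 hc x).2 ((PySem.Set.mem_ofList _ _).2 hxa)
      simp only [PySem.Set.mem_ofList, List.mem_filter] at this
      exact hxt this.1
    rw [hl, hr]

-- ===== VERDICT (by name: the statement is the Claim_ definition above) =====
theorem check_spec : Claim_equal_check := by
  intro aru wakaranai t _
  unfold Spec_check check check_alt
  rw [check_loop_inv, PySem.Dict.foldl_insert_getD_add_one_eq_counter]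
  have hfl : PySem.Set.update PySem.Set.empty (t.filter (fun i => aru.contains i))
      = PySem.Set.ofList (t.filter (fun i => aru.contains i)) :=
    PySem.Set.update_nil_left _
  simp only [hfl, zero_add, PySem.Dict.getD_counter, PySem.Dict.contains_counter]
  have hcnt : ((PySem.Set.union (PySem.Set.ofList aru) wakaranai).map
      (fun u => (t.count u : Int))).sum
      = (t.countP (fun i => aru.contains i || wakaranai.contains i) : Nat) := by
    rw [sum_count_eq_countP t _ (PySem.Set.nodup_union _ wakaranai (PySem.Set.nodup_ofList aru))]
    congr 1
    apply List.countP_congr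
    intro i _
    have hmem : i ∈ PySem.Set.union (PySem.Set.ofList aru) wakaranai ↔ i ∈ aru ∨ i ∈ wakaranai := by
      rw [PySem.Set.mem_union, PySem.Set.mem_ofList]
    rw [Bool.eq_iff_iff]
    simp [hmem]
  rw [hcnt, check_equal_eq_all]
  cases hc : ((t.countP (fun i => aru.contains i || wakaranai.contains i) : Int) == 4
      && aru.all (fun u => t.contains u)) <;> simp_all
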